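-- pv_equiv track=rewrite | github.com/codingwizard37/sponge_caser | main.py | get_sponged_word
-- ===== SOURCE A (Python) =====
-- def get_sponged_word(word):
--     chars = list(word)
--     for i in range(len(chars)):
--         try:
--             if chars[i] == 'i' and chars[i+1] != 'i':
--                 chars[i+1] = chars[i+1].upper()
--         except IndexError:
--             pass
--         if chars[i] == 'l' or (chars[i] != 'i' and is_odd(i)):
--             chars[i] = chars[i].upper()
--     return "".join(chars)
--
-- def is_odd(num):
--     return (num % 2) == 1
-- ===== SOURCE B (Python) =====
-- def get_sponged_word(word):
--     # Staged mark-then-apply: build an uppercase mask in three passes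
--     # (odd positions; 'l' positions; successor-of-'i' marking with 'i' cleared),
--     # then apply the mask in one final zip pass.
--     n = len(word)
--     up = [k % 2 == 1 for k in range(n)]
--     for k, c in enumerate(word):
--         if c == 'l':
--             up[k] = True
--     for k, c in enumerate(word):
--         if c == 'i':
--             if k + 1 < n:
--                 up[k + 1] = True
--             up[k] = False
--     return "".join(c.upper() if u else c for c, u in zip(word, up))
-- ===== Notes on version B (the rewrite author's own statement) =====
-- stated objective: alternative
-- what changed: Replaces A's single stateful pass that mutates the char list with a lookahead write under try/except by a staged mark-then-apply algorithm: build a boolean uppercase mask in three independent passes (odd positions, 'l' positions, successor-of-'i' marking with 'i' positions cleared) and apply the mask in one final zip pass.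
import Mathlib
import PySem

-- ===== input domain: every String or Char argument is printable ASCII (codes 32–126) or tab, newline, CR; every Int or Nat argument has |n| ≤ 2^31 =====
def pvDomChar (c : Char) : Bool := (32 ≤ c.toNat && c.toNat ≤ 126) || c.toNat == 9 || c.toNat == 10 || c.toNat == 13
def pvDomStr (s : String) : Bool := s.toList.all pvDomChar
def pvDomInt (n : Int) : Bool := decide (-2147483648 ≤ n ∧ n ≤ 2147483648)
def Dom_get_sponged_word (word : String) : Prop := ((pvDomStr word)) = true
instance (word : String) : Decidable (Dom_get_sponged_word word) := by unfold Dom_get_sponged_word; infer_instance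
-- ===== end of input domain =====

-- B replaces A's single stateful pass (in-place lookahead write under try/except) by a staged
-- mark-then-apply algorithm: an uppercase mask built in three passes, applied in a final zip pass.

-- ===== PORT A =====
def is_odd (num : Int) : Bool := PySem.Int.mod num 2 == 1

def get_sponged_word (word : String) : String :=
  let chars := word.toList
  let chars := (PySem.List.pyRange 0 (chars.length) 1).foldl (fun s i =>
    -- try: if chars[i] == 'i' and chars[i+1] != 'i': chars[i+1] = chars[i+1].upper()
    -- except IndexError: pass   (pyGet? = none models the IndexError, caught by the pass)
    let s :=
      match PySem.List.pyGet? s i, PySem.List.pyGet? s (i + 1) with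
      | some ci, some cn =>
          if ci = 'i' ∧ cn ≠ 'i' then PySem.List.pySetD s (i + 1) (PySem.Chars.upperChar cn) else s
      | _, _ => s
    -- if chars[i] == 'l' or (chars[i] != 'i' and is_odd(i)): chars[i] = chars[i].upper()
    match PySem.List.pyGet? s i with
    | some ci =>
        if ci = 'l' ∨ (ci ≠ 'i' ∧ is_odd i = true) then PySem.List.pySetD s i (PySem.Chars.upperChar ci) else s
    | none => s) chars
  String.mk chars

-- ===== PORT B =====
def get_sponged_word_alt (word : String) : String :=
  let w := word.toList
  let n := w.length
  -- up = [k % 2 == 1 for k in range(n)]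
  let up : List Bool := (PySem.List.pyRange 0 (n : Int) 1).map (fun k => PySem.Int.mod k 2 == 1)
  -- for k, c in enumerate(word): if c == 'l': up[k] = True
  let up := (PySem.List.enumerate w 0).foldl (fun u kc =>
      if kc.2 = 'l' then PySem.List.pySetD u kc.1 true else u) up
  -- for k, c in enumerate(word): if c == 'i': (if k+1 < n: up[k+1] = True); up[k] = False
  let up := (PySem.List.enumerate w 0).foldl (fun u kc =>
      if kc.2 = 'i' then
        let u := if kc.1 + 1 < (n : Int) then PySem.List.pySetD u (kc.1 + 1) true else u
        PySem.List.pySetD u kc.1 false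
      else u) up
  -- "".join(c.upper() if u else c for c, u in zip(word, up))
  String.mk ((w.zip up).map (fun cu => if cu.2 then PySem.Chars.upperChar cu.1 else cu.1))

-- ===== PRECONDITION & SPEC =====
def Spec_get_sponged_word (word : String) (out : String) : Prop := out = get_sponged_word_alt word
instance (word : String) (out : String) : Decidable (Spec_get_sponged_word word out) := by unfold Spec_get_sponged_word; infer_instance

-- ===== CLAIM (what is proved, stated in full; the proofs are below) =====
def Claim_equal_get_sponged_word : Prop := ∀ (word : String), Dom_get_sponged_word word → Spec_get_sponged_word word (get_sponged_word word)

-- ===== LEMMAS AND PROOFS =====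

-- abbreviations used only by the proofs
def pvUp (c : Char) : Char := PySem.Chars.upperChar c

-- "the lookahead at step m-1 uppercased position m"
def pvPend (w : List Char) (m : Nat) : Bool :=
  decide (0 < m) && decide (w.getD (m - 1) ' ' = 'i') && decide (w.getD m ' ' ≠ 'i')

-- the predicate under which position k ends up uppercased
def pvCond (w : List Char) (k : Nat) : Bool :=
  decide (w.getD k ' ' = 'l') || (decide (w.getD k ' ' ≠ 'i') && decide (k % 2 = 1)) || pvPend w k

def pvOut (w : List Char) (k : Nat) : Char :=
  if pvCond w k then pvUp (w.getD k ' ') else w.getD k ' '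

def pvPendVal (w : List Char) (m : Nat) : Char :=
  if pvPend w m then pvUp (w.getD m ' ') else w.getD m ' '

-- state of A's list after the first m loop iterations
def pvState (w : List Char) (m : Nat) : List Char :=
  (List.range w.length).map (fun k => if k < m then pvOut w k else if k = m then pvPendVal w m else w.getD k ' ')

-- GENERIC fold driver shared by both ports' loops: a foldl over range(0, m) that steps g m to g (m+1)
theorem pv_fold_range {α : Type} (f : α → Int → α) (g : Nat → α) (n : Nat)
    (hstep : ∀ m, m < n → f (g m) (m : Int) = g (m + 1)) :
    ∀ m, m ≤ n → (PySem.List.pyRange 0 (m : Int) 1).foldl f (g 0) = g m := by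
  intro m
  induction m with
  | zero =>
      intro _
      simp only [Nat.cast_zero]
      rw [PySem.List.pyRange_one_eq_nil (le_refl 0)]
      simp
  | succ k ih =>
      intro hk
      have hcast : ((k + 1 : Nat) : Int) = (k : Int) + 1 := by push_cast; ring
      rw [hcast, PySem.List.pyRange_one_succ_right (by positivity)]
      rw [List.foldl_append, ih (by omega)]
      simp only [List.foldl_cons, List.foldl_nil]
      exact hstep k (by omega)

theorem pv_islower_iff (c : Char) : PySem.Chars.islower c = true ↔ 97 ≤ c.toNat ∧ c.toNat ≤ 122 := by
  unfold PySem.Chars.islower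
  simp only [Bool.and_eq_true, decide_eq_true_eq, Char.le_def, UInt32.le_iff_toNat_le]
  exact Iff.rfl

theorem pv_toNat_up_lower {c : Char} (h : PySem.Chars.islower c = true) :
    (pvUp c).toNat = c.toNat - 32 := by
  have hr := (pv_islower_iff c).mp h
  unfold pvUp PySem.Chars.upperChar
  rw [if_pos h, Char.toNat_ofNat, if_pos (Or.inl (by omega))]

theorem pv_up_not_lower {c : Char} (h : PySem.Chars.islower c = false) : pvUp c = c := by
  unfold pvUp PySem.Chars.upperChar
  rw [h]; simp

theorem pv_up_ne_i (c : Char) : pvUp c ≠ 'i' := by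
  intro he
  cases h : PySem.Chars.islower c with
  | true =>
      have h1 := pv_toNat_up_lower h
      have hr := (pv_islower_iff c).mp h
      rw [he] at h1
      have hi : ('i' : Char).toNat = 105 := by decide
      omega
  | false =>
      rw [pv_up_not_lower h] at he
      subst he
      have : PySem.Chars.islower 'i' = true := by decide
      rw [h] at this
      cases this

theorem pv_up_up (c : Char) : pvUp (pvUp c) = pvUp c := by
  cases h : PySem.Chars.islower c with
  | true =>
      have h1 := pv_toNat_up_lower h
      have hr := (pv_islower_iff c).mp h
      apply pv_up_not_lower
      cases h2 : PySem.Chars.islower (pvUp c) with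
      | true => have := (pv_islower_iff (pvUp c)).mp h2; omega
      | false => rfl
  | false => rw [pv_up_not_lower h, pv_up_not_lower h]

-- pendVal agrees with the original character on the tests A performs
theorem pv_pendVal_eq_i (w : List Char) (m : Nat) : (pvPendVal w m = 'i') ↔ (w.getD m ' ' = 'i') := by
  unfold pvPendVal pvPend
  split
  · rename_i h
    simp only [Bool.and_eq_true, decide_eq_true_eq] at h
    constructor
    · intro he; exact absurd he (pv_up_ne_i _)
    · intro he; exact absurd he h.2
  · exact Iff.rfl

theorem pv_length_state (w : List Char) (m : Nat) : (pvState w m).length = w.length := by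
  simp [pvState]

theorem pv_getElem_state (w : List Char) (m k : Nat) (hk : k < w.length) :
    (pvState w m)[k]'(by rw [pv_length_state]; exact hk) =
      (if k < m then pvOut w k else if k = m then pvPendVal w m else w.getD k ' ') := by
  simp [pvState]

theorem pv_int_mod_two (m : Nat) : PySem.Int.mod (m : Int) 2 = ((m % 2 : Nat) : Int) := by
  exact_mod_cast PySem.Int.mod_natCast m 2

theorem pv_is_odd_cast (m : Nat) : is_odd (m : Int) = decide (m % 2 = 1) := by
  unfold is_odd
  rw [pv_int_mod_two]
  by_cases h : m % 2 = 1 <;> simp [h] <;> omega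

theorem pv_state_zero (w : List Char) : pvState w 0 = w := by
  apply List.ext_getElem (by rw [pv_length_state])
  intro k h1 h2
  rw [pv_getElem_state w 0 k h2]
  have : ¬ k < 0 := by omega
  rw [if_neg this]
  by_cases hk0 : k = 0
  · subst hk0
    rw [if_pos rfl]
    have hp : pvPend w 0 = false := by simp [pvPend]
    unfold pvPendVal
    rw [hp]
    simp [List.getElem?_eq_getElem h2]
  · rw [if_neg hk0, List.getD_eq_getElem _ _ h2]

theorem pv_out_char (w : List Char) (m : Nat) :
    (if pvPendVal w m = 'l' ∨ (pvPendVal w m ≠ 'i' ∧ is_odd (m : Int) = true)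
     then pvUp (pvPendVal w m) else pvPendVal w m) = pvOut w m := by
  rw [pv_is_odd_cast]
  unfold pvOut pvCond
  cases hp : pvPend w m with
  | true =>
      simp only [pvPendVal, hp, if_pos]
      simp [pv_up_up]
  | false =>
      simp only [pvPendVal, hp, Bool.false_eq_true, if_false]
      by_cases h1 : w.getD m ' ' = 'l' <;> by_cases h2 : w.getD m ' ' = 'i' <;> by_cases h3 : m % 2 = 1 <;>
        simp [h3]

theorem pv_second_assign (w : List Char) (m : Nat) (hm : m < w.length) :
    (if pvPendVal w m = 'l' ∨ (pvPendVal w m ≠ 'i' ∧ is_odd (m : Int) = true)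
     then PySem.List.pySetD ((List.range w.length).map (fun k => if k < m then pvOut w k else if k = m then pvPendVal w m
            else if k = m + 1 then pvPendVal w (m+1) else w.getD k ' ')) (m : Int) (PySem.Chars.upperChar (pvPendVal w m))
     else ((List.range w.length).map (fun k => if k < m then pvOut w k else if k = m then pvPendVal w m
            else if k = m + 1 then pvPendVal w (m+1) else w.getD k ' '))) = pvState w (m + 1) := by
  have hchar := pv_out_char w m
  split
  · rename_i hc
    rw [if_pos hc] at hchar
    rw [PySem.List.pySetD_natCast]
    apply List.ext_getElem (by simp [pv_length_state])
    intro k h1 h2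
    rw [List.getElem_set, pv_getElem_state w (m+1) k (by simpa [pv_length_state] using h2)]
    simp only [List.getElem_map, List.getElem_range]
    rcases Nat.lt_trichotomy k m with h | h | h
    · rw [if_neg (show ¬ m = k by omega), if_pos h, if_pos (show k < m + 1 by omega)]
    · subst h
      rw [if_pos (show k = k from rfl), if_pos (show k < k + 1 by omega)]
      exact hchar
    · rw [if_neg (show ¬ m = k by omega), if_neg (show ¬ k < m by omega),
        if_neg (show ¬ k = m by omega), if_neg (show ¬ k < m + 1 by omega)]
  · rename_i hc
    rw [if_neg hc] at hchar
    apply List.ext_getElem (by simp [pv_length_state])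
    intro k h1 h2
    rw [pv_getElem_state w (m+1) k (by simpa [pv_length_state] using h1)]
    simp only [List.getElem_map, List.getElem_range]
    rcases Nat.lt_trichotomy k m with h | h | h
    · rw [if_pos h, if_pos (show k < m + 1 by omega)]
    · subst h
      rw [if_neg (show ¬ k < k by omega), if_pos (show k = k from rfl), if_pos (show k < k + 1 by omega)]
      exact hchar
    · rw [if_neg (show ¬ k < m by omega), if_neg (show ¬ k = m by omega),
        if_neg (show ¬ k < m + 1 by omega)]

-- the single-iteration step of A's loop
def pvStep (s : List Char) (i : Int) : List Char :=
  let s :=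
    match PySem.List.pyGet? s i, PySem.List.pyGet? s (i + 1) with
    | some ci, some cn =>
        if ci = 'i' ∧ cn ≠ 'i' then PySem.List.pySetD s (i + 1) (PySem.Chars.upperChar cn) else s
    | _, _ => s
  match PySem.List.pyGet? s i with
  | some ci =>
      if ci = 'l' ∨ (ci ≠ 'i' ∧ is_odd i = true) then PySem.List.pySetD s i (PySem.Chars.upperChar ci) else s
  | none => s

theorem pv_step_state (w : List Char) (m : Nat) (hm : m < w.length) :
    pvStep (pvState w m) (m : Int) = pvState w (m + 1) := by
  have hlen := pv_length_state w m
  have hget_m : PySem.List.pyGet? (pvState w m) (m : Int) = some (pvPendVal w m) := by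
    rw [PySem.List.pyGet?_natCast]
    rw [List.getElem?_eq_getElem (by rw [hlen]; exact hm)]
    rw [pv_getElem_state w m m hm]
    simp
  unfold pvStep
  by_cases hsucc : m + 1 < w.length
  · -- chars[i+1] exists
    have hget_m1 : PySem.List.pyGet? (pvState w m) ((m : Int) + 1) = some (w.getD (m+1) ' ') := by
      have : ((m : Int) + 1) = ((m + 1 : Nat) : Int) := by push_cast; ring
      rw [this, PySem.List.pyGet?_natCast]
      rw [List.getElem?_eq_getElem (by rw [hlen]; exact hsucc)]
      rw [pv_getElem_state w m (m+1) hsucc]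
      rw [if_neg (by omega), if_neg (by omega), List.getD_eq_getElem _ _ hsucc]
    simp only [hget_m, hget_m1]
    -- the inner lookahead assignment produces exactly pvPendVal at position m+1
    have hkey : (if pvPendVal w m = 'i' ∧ w.getD (m+1) ' ' ≠ 'i'
          then PySem.List.pySetD (pvState w m) ((m : Int) + 1) (PySem.Chars.upperChar (w.getD (m+1) ' '))
          else pvState w m) =
        (List.range w.length).map (fun k => if k < m then pvOut w k else if k = m then pvPendVal w m
          else if k = m + 1 then pvPendVal w (m+1) else w.getD k ' ') := by
      have hpend1 : pvPend w (m+1) = decide (pvPendVal w m = 'i' ∧ w.getD (m+1) ' ' ≠ 'i') := by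
        unfold pvPend
        have h0 : 0 < m + 1 := Nat.succ_pos m
        simp only [Nat.add_sub_cancel, h0, decide_true, Bool.true_and, ← Bool.decide_and]
        rw [decide_eq_decide]
        rw [pv_pendVal_eq_i]
      split
      · rename_i hc
        have : ((m : Int) + 1) = ((m + 1 : Nat) : Int) := by push_cast; ring
        rw [this, PySem.List.pySetD_natCast]
        apply List.ext_getElem (by simp [pv_length_state])
        intro k h1 h2
        rw [List.getElem_set]
        simp only [List.getElem_map, List.getElem_range]
        have h2' : k < w.length := by simpa using h2
        by_cases hk : k = m + 1
        · subst hk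
          rw [if_pos rfl, if_neg (by omega), if_neg (by omega), if_pos rfl]
          unfold pvPendVal
          rw [hpend1]
          simp only [decide_eq_true_eq]
          rw [if_pos hc]
          rfl
        · rw [if_neg (fun h => hk h.symm)]
          rw [pv_getElem_state w m k (by simpa [pv_length_state] using h1)]
          by_cases hklt : k < m
          · simp [hklt]
          · rw [if_neg hklt, if_neg hklt]
            by_cases hkm : k = m
            · simp [hkm]
            · rw [if_neg hkm, if_neg hkm, if_neg hk]
      · rename_i hc
        apply List.ext_getElem (by simp [pv_length_state])
        intro k h1 h2
        rw [pv_getElem_state w m k (by simpa [pv_length_state] using h1)]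
        simp only [List.getElem_map, List.getElem_range]
        by_cases hklt : k < m
        · simp [hklt]
        · rw [if_neg hklt, if_neg hklt]
          by_cases hkm : k = m
          · simp [hkm]
          · rw [if_neg hkm, if_neg hkm]
            by_cases hk : k = m + 1
            · subst hk
              rw [if_pos rfl]
              unfold pvPendVal
              rw [hpend1]
              simp only [decide_eq_true_eq]
              rw [if_neg hc]
            · rw [if_neg hk]
    rw [hkey]
    -- now the second assignment
    have hget2 : PySem.List.pyGet? ((List.range w.length).map (fun k => if k < m then pvOut w k else if k = m then pvPendVal w m
          else if k = m + 1 then pvPendVal w (m+1) else w.getD k ' ')) (m : Int) = some (pvPendVal w m) := by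
      rw [PySem.List.pyGet?_natCast]
      rw [List.getElem?_eq_getElem (by simpa using hm)]
      simp
    simp only [hget2]
    exact pv_second_assign w m hm
  · -- m + 1 = length: chars[i+1] raises IndexError, caught; inner block is a no-op
    have hnone : PySem.List.pyGet? (pvState w m) ((m : Int) + 1) = none := by
      have : ((m : Int) + 1) = ((m + 1 : Nat) : Int) := by push_cast; ring
      rw [this, PySem.List.pyGet?_natCast]
      apply List.getElem?_eq_none
      omega
    simp only [hget_m, hnone]
    have heq : pvState w m = (List.range w.length).map (fun k => if k < m then pvOut w k else if k = m then pvPendVal w m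
        else if k = m + 1 then pvPendVal w (m+1) else w.getD k ' ') := by
      apply List.ext_getElem (by simp [pv_length_state])
      intro k h1 h2
      rw [pv_getElem_state w m k (by simpa [pv_length_state] using h1)]
      simp only [List.getElem_map, List.getElem_range]
      have h2' : k < w.length := by simpa using h2
      have hk : k ≠ m + 1 := by omega
      by_cases hklt : k < m
      · simp [hklt]
      · rw [if_neg hklt, if_neg hklt]
        by_cases hkm : k = m
        · simp [hkm]
        · rw [if_neg hkm, if_neg hkm, if_neg hk]
    rw [heq]
    exact pv_second_assign w m hm

theorem pv_state_full (w : List Char) :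
    pvState w w.length = (List.range w.length).map (fun k => pvOut w k) := by
  apply List.ext_getElem (by simp [pv_length_state])
  intro k h1 h2
  rw [pv_getElem_state w w.length k (by simpa [pv_length_state] using h1)]
  simp only [List.getElem_map, List.getElem_range]
  rw [if_pos (by simpa using h2)]

theorem pv_a_eq (word : String) :
    get_sponged_word word = String.mk ((List.range word.toList.length).map (fun k => pvOut word.toList k)) := by
  have hfold := pv_fold_range pvStep (pvState word.toList) word.toList.length
      (fun m hm => pv_step_state word.toList m hm) word.toList.length (le_refl _)
  rw [pv_state_zero] at hfold
  show String.mk ((PySem.List.pyRange 0 (word.toList.length) 1).foldl pvStep word.toList) = _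
  rw [hfold, pv_state_full]

-- ===== B-side: the three mask stages =====

def pvMask1 (k : Nat) : Bool := decide (k % 2 = 1)
def pvMask2 (w : List Char) (k : Nat) : Bool := pvMask1 k || decide (w.getD k ' ' = 'l')
def pvMask3 (w : List Char) (k : Nat) : Bool :=
  if w.getD k ' ' = 'i' then false
  else pvMask2 w k || (decide (0 < k) && decide (w.getD (k - 1) ' ' = 'i'))

-- the final mask at position k is exactly the uppercase predicate of the loop analysis
theorem pv_mask3_eq_cond (w : List Char) (k : Nat) : pvMask3 w k = pvCond w k := by
  unfold pvMask3 pvMask2 pvMask1 pvCond pvPend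
  set c := w.getD k ' ' with hc
  set p := w.getD (k - 1) ' ' with hp
  by_cases hi : c = 'i'
  · rw [if_pos hi]
    simp [hi]
  · rw [if_neg hi]
    by_cases hl : c = 'l' <;> by_cases ho : k % 2 = 1 <;>
      by_cases h0 : 0 < k <;> by_cases hq : p = 'i' <;>
      simp [hi, hl, ho, h0, hq]

-- pass-2 state after m iterations
def pvS2 (w : List Char) (m : Nat) : List Bool :=
  (List.range w.length).map (fun k => if k < m then pvMask2 w k else pvMask1 k)

-- pass-3 state after m iterations
def pvS3 (w : List Char) (m : Nat) : List Bool :=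
  (List.range w.length).map (fun k =>
    if k < m then pvMask3 w k
    else if k = m then pvMask2 w k || (decide (0 < m) && decide (w.getD (m - 1) ' ' = 'i'))
    else pvMask2 w k)

def pvStep2 (w : List Char) (u : List Bool) (j : Int) : List Bool :=
  if PySem.List.pyGetD w j ' ' = 'l' then PySem.List.pySetD u j true else u

def pvStep3 (w : List Char) (u : List Bool) (j : Int) : List Bool :=
  if PySem.List.pyGetD w j ' ' = 'i' then
    PySem.List.pySetD (if j + 1 < (w.length : Int) then PySem.List.pySetD u (j + 1) true else u) j false
  else u

theorem pv_step2_state (w : List Char) (m : Nat) (hm : m < w.length) :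
    pvStep2 w (pvS2 w m) (m : Int) = pvS2 w (m + 1) := by
  unfold pvStep2
  rw [PySem.List.pyGetD_natCast]
  by_cases hl : w.getD m ' ' = 'l'
  · rw [if_pos hl, PySem.List.pySetD_natCast]
    apply List.ext_getElem (by simp [pvS2])
    intro k h1 h2
    rw [List.getElem_set]
    simp only [pvS2, List.getElem_map, List.getElem_range]
    by_cases hk : k = m
    · subst hk
      rw [if_pos rfl, if_pos (by omega)]
      unfold pvMask2
      rw [hl]
      simp
    · rw [if_neg (fun h => hk h.symm)]
      by_cases hklt : k < m
      · rw [if_pos hklt, if_pos (by omega)]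
      · rw [if_neg hklt, if_neg (by omega)]
  · rw [if_neg hl]
    apply List.ext_getElem (by simp [pvS2])
    intro k h1 h2
    simp only [pvS2, List.getElem_map, List.getElem_range]
    by_cases hk : k = m
    · subst hk
      rw [if_neg (by omega), if_pos (by omega)]
      unfold pvMask2
      rw [decide_eq_false hl, Bool.or_false]
    · by_cases hklt : k < m
      · rw [if_pos hklt, if_pos (by omega)]
      · rw [if_neg hklt, if_neg (by omega)]

theorem pv_length_S3 (w : List Char) (m : Nat) : (pvS3 w m).length = w.length := by
  simp [pvS3]

theorem pv_getElem_S3 (w : List Char) (m k : Nat) (hk : k < w.length) :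
    (pvS3 w m)[k]'(by rw [pv_length_S3]; exact hk) =
      (if k < m then pvMask3 w k
       else if k = m then pvMask2 w k || (decide (0 < m) && decide (w.getD (m - 1) ' ' = 'i'))
       else pvMask2 w k) := by
  simp [pvS3]

theorem pv_step3_state (w : List Char) (m : Nat) (hm : m < w.length) :
    pvStep3 w (pvS3 w m) (m : Int) = pvS3 w (m + 1) := by
  unfold pvStep3
  rw [PySem.List.pyGetD_natCast]
  have hcast : ((m : Int) + 1) = ((m + 1 : Nat) : Int) := by push_cast; ring
  by_cases hi : w.getD m ' ' = 'i'
  · rw [if_pos hi]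
    by_cases hs : m + 1 < w.length
    · have hs' : (m : Int) + 1 < (w.length : Int) := by exact_mod_cast Nat.cast_lt.mpr hs
      rw [if_pos hs', hcast, PySem.List.pySetD_natCast, PySem.List.pySetD_natCast]
      apply List.ext_getElem (by simp [pvS3])
      intro k h1 h2
      have h2' : k < w.length := by simpa [pvS3] using h2
      rw [List.getElem_set, List.getElem_set, pv_getElem_S3 w (m + 1) k h2']
      by_cases hk : k = m
      · subst hk
        rw [if_pos rfl, if_pos (by omega)]
        unfold pvMask3
        rw [if_pos hi]
      · rw [if_neg (fun h => hk h.symm)]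
        by_cases hk1 : k = m + 1
        · subst hk1
          rw [if_pos rfl, if_neg (by omega), if_pos rfl]
          simp only [Nat.add_sub_cancel]
          rw [hi]
          simp
        · rw [if_neg (fun h => hk1 h.symm), pv_getElem_S3 w m k h2']
          by_cases hklt : k < m
          · rw [if_pos hklt, if_pos (by omega)]
          · rw [if_neg hklt, if_neg hk, if_neg (by omega), if_neg hk1]
    · have hs' : ¬ (m : Int) + 1 < (w.length : Int) := by
        intro h
        exact hs (by exact_mod_cast h)
      rw [if_neg hs', PySem.List.pySetD_natCast]
      apply List.ext_getElem (by simp [pvS3])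
      intro k h1 h2
      have h2' : k < w.length := by simpa [pvS3] using h2
      rw [List.getElem_set, pv_getElem_S3 w (m + 1) k h2']
      by_cases hk : k = m
      · subst hk
        rw [if_pos rfl, if_pos (by omega)]
        unfold pvMask3
        rw [if_pos hi]
      · rw [if_neg (fun h => hk h.symm), pv_getElem_S3 w m k h2']
        have hklt : k < m := by omega
        rw [if_pos hklt, if_pos (by omega)]
  · rw [if_neg hi]
    apply List.ext_getElem (by simp [pvS3])
    intro k h1 h2
    have h2' : k < w.length := by simpa [pvS3] using h2
    rw [pv_getElem_S3 w m k h2', pv_getElem_S3 w (m + 1) k h2']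
    by_cases hk : k = m
    · subst hk
      rw [if_neg (by omega), if_pos rfl, if_pos (by omega)]
      unfold pvMask3
      rw [if_neg hi]
    · by_cases hklt : k < m
      · rw [if_pos hklt, if_pos (by omega)]
      · rw [if_neg hklt, if_neg hk, if_neg (by omega)]
        by_cases hk1 : k = m + 1
        · subst hk1
          rw [if_pos rfl]
          simp only [Nat.add_sub_cancel]
          rw [decide_eq_false hi]
          simp
        · rw [if_neg hk1]

theorem pv_S2_zero (w : List Char) :
    (PySem.List.pyRange 0 ((w.length : Nat) : Int) 1).map (fun k => PySem.Int.mod k 2 == 1) = pvS2 w 0 := by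
  rw [PySem.List.pyRange_zero_natCast, List.map_map]
  unfold pvS2
  apply List.map_congr_left
  intro k hk
  rw [List.mem_range] at hk
  simp only [Function.comp]
  rw [if_neg (by omega)]
  rw [pv_int_mod_two k]
  unfold pvMask1
  rcases Nat.mod_two_eq_zero_or_one k with h | h <;> simp [h]

theorem pv_pass2 (w : List Char) :
    (PySem.List.enumerate w 0).foldl (fun u kc =>
        if kc.2 = 'l' then PySem.List.pySetD u kc.1 true else u) (pvS2 w 0) = pvS2 w w.length := by
  rw [PySem.List.enumerate_eq_map_pyRange w ' ', List.foldl_map, PySem.List.len_eq]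
  exact pv_fold_range _ (pvS2 w) w.length (fun m hm => pv_step2_state w m hm) w.length (le_refl _)

theorem pv_pass3 (w : List Char) :
    (PySem.List.enumerate w 0).foldl (fun u kc =>
        if kc.2 = 'i' then
          PySem.List.pySetD (if kc.1 + 1 < (w.length : Int) then PySem.List.pySetD u (kc.1 + 1) true else u) kc.1 false
        else u) (pvS3 w 0) = pvS3 w w.length := by
  rw [PySem.List.enumerate_eq_map_pyRange w ' ', List.foldl_map, PySem.List.len_eq]
  exact pv_fold_range _ (pvS3 w) w.length (fun m hm => pv_step3_state w m hm) w.length (le_refl _)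

theorem pv_S3_zero (w : List Char) : pvS2 w w.length = pvS3 w 0 := by
  unfold pvS2 pvS3
  apply List.map_congr_left
  intro k hk
  rw [List.mem_range] at hk
  rw [if_pos hk, if_neg (by omega)]
  by_cases hk0 : k = 0
  · rw [if_pos hk0]; simp
  · rw [if_neg hk0]

theorem pv_S3_full (w : List Char) :
    pvS3 w w.length = (List.range w.length).map (fun k => pvMask3 w k) := by
  unfold pvS3
  apply List.map_congr_left
  intro k hk
  rw [List.mem_range] at hk
  rw [if_pos hk]

theorem pv_b_eq (word : String) :
    get_sponged_word_alt word = String.mk ((List.range word.toList.length).map (fun k => pvOut word.toList k)) := by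
  simp only [get_sponged_word_alt]
  rw [pv_S2_zero word.toList, pv_pass2 word.toList, pv_S3_zero word.toList,
    pv_pass3 word.toList, pv_S3_full]
  congr 1
  apply List.ext_getElem (by simp)
  intro k h1 h2
  have hk : k < word.toList.length := by simpa using h2
  simp only [List.getElem_map, List.getElem_zip, List.getElem_range]
  unfold pvOut
  rw [← pv_mask3_eq_cond, List.getD_eq_getElem _ _ hk]
  rfl

-- ===== VERDICT (by name: the statement is the Claim_ definition above) =====
theorem get_sponged_word_spec : Claim_equal_get_sponged_word := by
  intro word _hdom
  unfold Spec_get_sponged_word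
  rw [pv_a_eq, pv_b_eq]
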